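-- pv_equiv track=rewrite | github.com/HamzaMurghay/CryptographyCiphers | Ciphers/frequency_analyser.py | convert_to_data_format
-- ===== SOURCE A (Python) =====
-- def convert_to_data_format(sample_text, grp_size):
--     temp_frequency_list = []
--     duplicate_checker = []
--
--     sample_text = sample_text.replace(" ", "")
--     sample_text = sample_text.replace("\n", "")
--
--     for char_idx in range(len(sample_text) - grp_size + 1):
--         cur_group = sample_text[char_idx: char_idx + grp_size]
--         if cur_group not in duplicate_checker: temp_frequency_list.append((cur_group, sample_text.count(cur_group)))
--         duplicate_checker.append(cur_group)
--
--     return temp_frequency_list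
-- ===== SOURCE B (Python) =====
-- def convert_to_data_format(sample_text, grp_size):
--     text = sample_text.replace(" ", "").replace("\n", "")
--     positions = {}
--     for i in range(len(text) - grp_size + 1):
--         grp = text[i:i + grp_size]
--         positions.setdefault(grp, []).append(i)
--     result = []
--     for grp, pos_list in positions.items():
--         cnt = 0
--         nxt = 0
--         for p in pos_list:
--             if p >= nxt:
--                 cnt += 1
--                 nxt = p + grp_size
--         result.append((grp, cnt))
--     return result
-- ===== Notes on version B (the rewrite author's own statement) =====
-- stated objective: alternative
-- what changed: B replaces A's per-window scan of an ever-growing duplicate list plus a full str.count per distinct group by one pass that groups window start positions in a dict, then computes each non-overlapping count by a greedy sweep over that group's position list (intended as faster; a timing run measured B 101x at n=16384 where both finished, but both time out alike on large-group inputs, so the speed-up is unconfirmed as a label).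
-- outside the precondition, e.g. on convert_to_data_format('b\n', -2): A returns [('', 2)], B returns [('', 4)]
import Mathlib
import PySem

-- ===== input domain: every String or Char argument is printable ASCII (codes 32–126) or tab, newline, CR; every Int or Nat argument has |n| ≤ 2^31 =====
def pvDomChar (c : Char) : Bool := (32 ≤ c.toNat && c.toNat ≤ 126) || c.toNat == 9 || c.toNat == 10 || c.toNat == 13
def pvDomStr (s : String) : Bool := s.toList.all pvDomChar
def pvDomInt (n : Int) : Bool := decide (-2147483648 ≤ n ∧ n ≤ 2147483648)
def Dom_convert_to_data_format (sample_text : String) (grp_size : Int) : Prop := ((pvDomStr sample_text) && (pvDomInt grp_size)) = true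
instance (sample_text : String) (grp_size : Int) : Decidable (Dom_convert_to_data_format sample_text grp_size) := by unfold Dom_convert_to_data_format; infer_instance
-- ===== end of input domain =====

-- B replaces A's per-window scan of a growing duplicate list plus a str.count per distinct
-- group by one dict-grouping pass over window start positions followed by a greedy
-- non-overlapping count per group (objective: alternative algorithm).

-- ===== PORT A =====
def convert_to_data_format (sample_text : String) (grp_size : Int) : List (String × Int) :=
  let s1 := PySem.Str.replace sample_text " " ""
  let s  := PySem.Str.replace s1 "\n" ""
  let st := (PySem.List.pyRange 0 (PySem.Str.len s - grp_size + 1) 1).foldl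
    (fun (st : List (String × Int) × List String) char_idx =>
      let cur_group := PySem.Str.slice s (some char_idx) (some (char_idx + grp_size))
      let tfl := if st.2.contains cur_group then st.1
                 else st.1 ++ [(cur_group, (PySem.Str.count s cur_group : Int))]
      (tfl, st.2 ++ [cur_group]))
    ([], [])
  st.1

-- ===== PORT B =====
def convert_to_data_format_alt (sample_text : String) (grp_size : Int) : List (String × Int) :=
  let text := PySem.Str.replace (PySem.Str.replace sample_text " " "") "\n" ""
  let positions := (PySem.List.pyRange 0 (PySem.Str.len text - grp_size + 1) 1).foldl
    (fun (d : PySem.Dict String (List Int)) i =>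
      d.modify (PySem.Str.slice text (some i) (some (i + grp_size))) [] (· ++ [i]))
    PySem.Dict.empty
  positions.items.map (fun gp =>
    (gp.1, (gp.2.foldl (fun (st : Int × Int) p => if st.2 ≤ p then (st.1 + 1, p + grp_size) else st) ((0 : Int), (0 : Int))).1))

-- ===== PRECONDITION & SPEC =====
-- Pre_ excludes negative group sizes, which are outside the function's natural domain:
-- there every Python slice degenerates via negative-length windows and A's result is an
-- artefact of Python's slicing/empty-pattern-count conventions, which B does not reproduce.
def Pre_convert_to_data_format (sample_text : String) (grp_size : Int) : Prop := 0 ≤ grp_size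
instance (sample_text : String) (grp_size : Int) : Decidable (Pre_convert_to_data_format sample_text grp_size) := by unfold Pre_convert_to_data_format; infer_instance

def pvWitness_convert_to_data_format : String × Int := ("ab cab", 2)

def Spec_convert_to_data_format (sample_text : String) (grp_size : Int) (out : List (String × Int)) : Prop := out = convert_to_data_format_alt sample_text grp_size
instance (sample_text : String) (grp_size : Int) (out : List (String × Int)) : Decidable (Spec_convert_to_data_format sample_text grp_size out) := by unfold Spec_convert_to_data_format; infer_instance

-- ===== CLAIM (what is proved, stated in full; the proofs are below) =====
def Claim_equal_convert_to_data_format : Prop := ∀ (sample_text : String) (grp_size : Int), Dom_convert_to_data_format sample_text grp_size → Pre_convert_to_data_format sample_text grp_size → Spec_convert_to_data_format sample_text grp_size (convert_to_data_format sample_text grp_size)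

-- ===== LEMMAS AND PROOFS =====

-- the window string starting at i
def pvWstr (cs : List Char) (K i : Nat) : String := String.ofList ((cs.drop i).take K)

-- first-seen-order deduplication against an accumulated duplicate list
def pvDedup (dup : List String) : List String → List String
  | [] => []
  | g :: ws => if dup.contains g then pvDedup (dup ++ [g]) ws
               else g :: pvDedup (dup ++ [g]) ws

-- greedy non-overlapping counting step (Nat threshold)
def pvStep (K : Nat) (st : Int × Nat) (p : Nat) : Int × Nat :=
  if st.2 ≤ p then (st.1 + 1, p + K) else st

-- Python's non-overlapping substring count, as a structural recursion (g ≠ [] case)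
def pvCountR (g : List Char) : List Char → Nat
  | [] => 0
  | c :: t => if g.isPrefixOf (c :: t) && !g.isEmpty
              then 1 + pvCountR g ((c :: t).drop g.length)
              else pvCountR g t
termination_by l => l.length
decreasing_by
  all_goals simp_all [List.isEmpty_eq_false_iff]
  rename_i h
  have : g.length ≥ 1 := List.length_pos_of_ne_nil h.2
  omega

-- A's fold accumulates the first-seen distinct groups paired with their counts
theorem pvAfold (wf : Int → String) (cnt : String → Int) (l : List Int)
    (res : List (String × Int)) (dup : List String) :
    (l.foldl (fun (st : List (String × Int) × List String) i =>
        ((if st.2.contains (wf i) then st.1 else st.1 ++ [(wf i, cnt (wf i))]), st.2 ++ [wf i]))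
      (res, dup)).1
    = res ++ (pvDedup dup (l.map wf)).map (fun g => (g, cnt g)) := by
  induction l generalizing res dup with
  | nil => simp [pvDedup]
  | cons i l ih =>
    simp only [List.foldl_cons, List.map_cons, pvDedup]
    by_cases h : dup.contains (wf i)
    · rw [if_pos h, if_pos h, ih]
    · rw [if_neg h, if_neg h, ih]
      simp

-- dedup from a duplicate list is ofList filtered by non-membership
theorem pvDedup_eq (ws : List String) : ∀ dup : List String,
    pvDedup dup ws = (PySem.Set.ofList ws).filter (fun g => !dup.contains g) := by
  induction ws with
  | nil => intro dup; simp [pvDedup]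
  | cons g ws ih =>
    intro dup
    rw [pvDedup, PySem.Set.ofList_cons, ih]
    by_cases h : g ∈ dup
    · rw [if_pos (by simpa using h)]
      simp only [PySem.Set.discard, List.filter_filter, List.filter_cons]
      simp [h]
      apply List.filter_congr
      intro x _
      by_cases hx : x = g
      · simp [hx, h]
      · simp [hx]
    · rw [if_neg (by simpa using h)]
      simp only [PySem.Set.discard, List.filter_filter, List.filter_cons]
      simp [h]
      apply List.filter_congr
      intro x _
      by_cases hx : x = g
      · simp [hx, h]
      · simp [hx]

-- the count.go fuel loop computes pvCountR
theorem pvGo (g : List Char) (hg : g ≠ []) :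
    ∀ (fuel : Nat) (l : List Char) (acc : Nat), l.length ≤ fuel →
    PySem.Chars.count.go g fuel l acc = acc + pvCountR g l := by
  intro fuel
  induction fuel with
  | zero =>
    intro l acc hl
    have : l = [] := by cases l <;> simp_all
    subst this; simp [PySem.Chars.count.go, pvCountR]
  | succ fuel ih =>
    intro l acc hl
    cases l with
    | nil => simp [PySem.Chars.count.go, pvCountR]
    | cons c t =>
      rw [PySem.Chars.count.go]
      by_cases h : g.isPrefixOf (c :: t)
      · have hK : 1 ≤ g.length := List.length_pos_of_ne_nil hg
        rw [if_pos h, ih _ _ (by simp only [List.length_drop, List.length_cons]; simp only [List.length_cons] at hl; omega), pvCountR]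
        simp [h, hg]
        omega
      · rw [if_neg h, ih _ _ (by simp at hl ⊢; omega), pvCountR]
        simp [h]

theorem pvCount_eq_countR (cs g : List Char) (hg : g ≠ []) :
    PySem.Chars.count cs g = pvCountR g cs := by
  rw [PySem.Chars.count, if_neg (by simpa using hg), pvGo g hg cs.length cs 0 (le_refl _)]
  omega

-- no occurrence at or beyond t: count of the suffix is zero
theorem pvC0 (g : List Char) : ∀ (l : List Char), (∀ j, ¬ g <+: l.drop j) → pvCountR g l = 0 := by
  intro l
  induction l with
  | nil => intro _; simp [pvCountR]
  | cons c t ih =>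
    intro h
    rw [pvCountR]
    have h0 : ¬ g.isPrefixOf (c :: t) := by
      intro hp
      exact h 0 (by simpa [List.isPrefixOf_iff_prefix] using hp)
    simp only [h0, Bool.false_and, if_neg Bool.false_ne_true]
    exact ih (fun j => by simpa using h (j + 1))

-- skipping a no-occurrence stretch [t, p) leaves the count unchanged
theorem pvC1 (g cs : List Char) :
    ∀ (d t : Nat), (∀ q, t ≤ q → q < t + d → ¬ g <+: cs.drop q) →
    pvCountR g (cs.drop t) = pvCountR g (cs.drop (t + d)) := by
  intro d
  induction d with
  | zero => intro t _; rfl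
  | succ d ih =>
    intro t h
    have hstep : pvCountR g (cs.drop t) = pvCountR g (cs.drop (t + 1)) := by
      cases hcs : cs.drop t with
      | nil =>
        have hlen : cs.length ≤ t := by
          have := congrArg List.length hcs
          simp at this
          omega
        rw [List.drop_eq_nil_of_le (by omega)]
      | cons c tl =>
        have hnp : ¬ g.isPrefixOf (c :: tl) := by
          intro hp
          exact h t (le_refl _) (by omega) (by rw [hcs]; simpa [List.isPrefixOf_iff_prefix] using hp)
        have htl : cs.drop (t + 1) = tl := by
          rw [← List.tail_drop, hcs, List.tail_cons]
        rw [htl, pvCountR]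
        simp [hnp]
    rw [hstep, ih (t + 1) (fun q hq1 hq2 => h q (by omega) (by omega))]
    have harg : t + 1 + d = t + (d + 1) := by omega
    rw [harg]

-- main greedy lemma: the greedy sweep over all occurrence positions computes pvCountR
theorem pvMG (cs g : List Char) (hg : g ≠ []) :
    ∀ (O : List Nat) (t : Nat) (c : Int), O.Pairwise (· < ·) →
    (∀ p ∈ O, g <+: cs.drop p) → (∀ q, t ≤ q → g <+: cs.drop q → q ∈ O) →
    (O.foldl (pvStep g.length) (c, t)).1 = c + (pvCountR g (cs.drop t) : Int) := by
  intro O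
  induction O with
  | nil =>
    intro t c _ _ hcompl
    have hz : pvCountR g (cs.drop t) = 0 := by
      apply pvC0
      intro j hj
      rw [List.drop_drop] at hj
      exact absurd (hcompl _ (by omega) hj) List.not_mem_nil
    simp [hz]
  | cons p ps ih =>
    intro t c hpw hocc hcompl
    have hK : 1 ≤ g.length := List.length_pos_of_ne_nil hg
    have hpw' := List.pairwise_cons.mp hpw
    by_cases ht : t ≤ p
    · have h1 : (ps.foldl (pvStep g.length) (c + 1, p + g.length)).1
          = c + 1 + (pvCountR g (cs.drop (p + g.length)) : Int) := by
        apply ih _ _ hpw'.2 (fun q hq => hocc q (List.mem_cons_of_mem _ hq))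
        intro q hq hocc'
        rcases List.mem_cons.mp (hcompl q (by omega) hocc') with h | h
        · omega
        · exact h
      have hskip : pvCountR g (cs.drop t) = pvCountR g (cs.drop p) := by
        have harg : t + (p - t) = p := by omega
        have hc1 := pvC1 g cs (p - t) t ?_
        · rw [harg] at hc1
          exact hc1
        · intro q hq1 hq2 hocc'
          rcases List.mem_cons.mp (hcompl q hq1 hocc') with h | h
          · omega
          · have := hpw'.1 q h
            omega
      have h2 : pvCountR g (cs.drop t) = 1 + pvCountR g (cs.drop (p + g.length)) := by
        rw [hskip]
        have hp := hocc p List.mem_cons_self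
        cases hcs : cs.drop p with
        | nil => rw [hcs] at hp; exact absurd (List.prefix_nil.mp hp) hg
        | cons ch tl =>
          rw [hcs] at hp
          have hpre : g.isPrefixOf (ch :: tl) := List.isPrefixOf_iff_prefix.mpr hp
          rw [pvCountR, if_pos (by simp [hpre, hg])]
          have hdrop : (ch :: tl).drop g.length = cs.drop (p + g.length) := by
            rw [← hcs, List.drop_drop, Nat.add_comm]
          rw [hdrop]
      rw [List.foldl_cons, pvStep, if_pos ht, h1, h2]
      push_cast
      ring
    · rw [List.foldl_cons, pvStep, if_neg ht]
      apply ih _ _ hpw'.2 (fun q hq => hocc q (List.mem_cons_of_mem _ hq))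
      intro q hq hocc'
      rcases List.mem_cons.mp (hcompl q hq hocc') with h | h
      · omega
      · exact h

-- greedy with step 0 over an increasing list counts every element
theorem pvZ : ∀ (O : List Nat) (t : Nat) (c : Int), O.Pairwise (· < ·) → (∀ p ∈ O, t ≤ p) →
    (O.foldl (pvStep 0) (c, t)).1 = c + O.length := by
  intro O
  induction O with
  | nil => intro t c _ _; simp
  | cons p ps ih =>
    intro t c hpw hmem
    rw [List.foldl_cons, pvStep, if_pos (hmem p List.mem_cons_self)]
    have hrec := ih (p + 0) (c + 1) (List.pairwise_cons.mp hpw).2 ?_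
    · rw [hrec]
      simp [List.length_cons]
      ring
    · intro q hq
      have := (List.pairwise_cons.mp hpw).1 q hq
      omega

-- the Int-state greedy fold over cast positions equals the Nat-threshold fold
theorem pvGreedyCast (K : Nat) : ∀ (P : List Nat) (c : Int) (t : Nat),
    ((P.map (fun (i : Nat) => (i : Int))).foldl
        (fun (st : Int × Int) p => if st.2 ≤ p then (st.1 + 1, p + (K : Int)) else st)
        (c, (t : Int))).1
    = (P.foldl (pvStep K) (c, t)).1 := by
  intro P
  induction P with
  | nil => intro c t; simp
  | cons p P ih =>
    intro c t
    rw [List.map_cons, List.foldl_cons, List.foldl_cons]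
    by_cases h : t ≤ p
    · rw [if_pos (by exact_mod_cast h : ((t : Int) ≤ (p : Int)))]
      rw [show pvStep K (c, t) p = (c + 1, p + K) from if_pos h]
      rw [show ((p : Int) + (K : Int)) = (((p + K : Nat)) : Int) by push_cast; ring]
      exact ih (c + 1) (p + K)
    · rw [if_neg (by exact_mod_cast h : ¬ ((t : Int) ≤ (p : Int)))]
      rw [show pvStep K (c, t) p = (c, t) from if_neg h]
      exact ih c t

-- the Python range of window starts, as a cast Nat range
theorem pvRange (n K : Nat) :
    PySem.List.pyRange 0 ((n : Int) - (K : Int) + 1) 1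
      = (List.range (n + 1 - K)).map (fun (i : Nat) => (i : Int)) := by
  rw [PySem.List.pyRange_of_pos _ _ one_pos]
  have hcnt : (if (0 : Int) < (n : Int) - (K : Int) + 1
      then (((n : Int) - (K : Int) + 1 - 0 + 1 - 1) / 1).toNat else 0) = n + 1 - K := by
    split_ifs with h
    · rw [Int.ediv_one]
      omega
    · omega
  rw [hcnt]
  apply List.map_congr_left
  intro i _
  omega

-- the window slice is pvWstr
theorem pvSlice (text : String) (K i : Nat) :
    PySem.Str.slice text (some (i : Int)) (some ((i : Int) + (K : Int)))
      = pvWstr text.toList K i := by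
  rw [PySem.Str.slice, pvWstr, PySem.Chars.slice_eq_listSlice, PySem.List.slice_natCast_add]

-- per-group: the greedy sweep over that group's window starts computes Python's count
theorem pvPG (cs : List Char) (K : Nat) (g : String)
    (hgW : g ∈ (List.range (cs.length + 1 - K)).map (pvWstr cs K)) :
    (((List.range (cs.length + 1 - K)).filter (fun i => pvWstr cs K i == g)).foldl
        (pvStep K) ((0 : Int), (0 : Nat))).1
      = (PySem.Chars.count cs g.toList : Int) := by
  obtain ⟨i0, hi0mem, hi0⟩ := List.mem_map.mp hgW
  rw [List.mem_range] at hi0mem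
  by_cases hK : K = 0
  · subst hK
    have hgempty : g = String.ofList [] := by
      rw [← hi0, pvWstr, List.take_zero]
    have hfilter : (List.range (cs.length + 1 - 0)).filter (fun i => pvWstr cs 0 i == g)
        = List.range (cs.length + 1) := by
      rw [Nat.sub_zero]
      apply List.filter_eq_self.mpr
      intro a _
      rw [pvWstr, List.take_zero, hgempty]
      exact beq_self_eq_true _
    rw [Nat.sub_zero] at hfilter ⊢
    rw [hfilter, pvZ _ 0 0 List.pairwise_lt_range (fun p _ => Nat.zero_le p)]
    have hgl : g.toList = [] := by rw [hgempty, String.toList_ofList]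
    rw [PySem.Chars.count, hgl]
    simp
  · have hKn : K ≤ cs.length := by omega
    have hi0le : i0 ≤ cs.length - K := by omega
    have hgl : g.toList = (cs.drop i0).take K := by
      rw [← hi0, pvWstr, String.toList_ofList]
    have hlen : g.toList.length = K := by
      rw [hgl, List.length_take, List.length_drop]
      omega
    have hgne : g.toList ≠ [] := by
      intro h
      rw [h] at hlen
      simp at hlen
      omega
    have hmg := pvMG cs g.toList hgne
      ((List.range (cs.length + 1 - K)).filter (fun i => pvWstr cs K i == g)) 0 0
      (List.Pairwise.sublist (List.filter_sublist) List.pairwise_lt_range) ?_ ?_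
    · rw [hlen] at hmg
      rw [hmg, List.drop_zero, pvCount_eq_countR cs g.toList hgne]
      simp
    · intro p hp
      have hcond := (List.mem_filter.mp hp).2
      have : pvWstr cs K p = g := by simpa using hcond
      have htake : (cs.drop p).take K = g.toList := by
        rw [← this, pvWstr, String.toList_ofList]
      rw [← htake]
      exact List.take_prefix _ _
    · intro q _ hocc'
      have hql : g.toList.length ≤ (cs.drop q).length := List.IsPrefix.length_le hocc'
      rw [List.length_drop, hlen] at hql
      apply List.mem_filter.mpr
      constructor
      · rw [List.mem_range]
        omega
      · have : (cs.drop q).take K = g.toList := by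
          rw [← hlen]
          exact (List.prefix_iff_eq_take.mp hocc').symm
        have : pvWstr cs K q = g := by
          rw [pvWstr, this, String.ofList_toList]
        simp [this]

-- A's pipeline: first-seen distinct windows paired with Python counts
theorem pvA (text : String) (K : Nat) :
    ((PySem.List.pyRange 0 (PySem.Str.len text - (K : Int) + 1) 1).foldl
      (fun (st : List (String × Int) × List String) char_idx =>
        ((if st.2.contains (PySem.Str.slice text (some char_idx) (some (char_idx + (K : Int)))) then st.1
          else st.1 ++ [(PySem.Str.slice text (some char_idx) (some (char_idx + (K : Int))),
                         (PySem.Str.count text (PySem.Str.slice text (some char_idx) (some (char_idx + (K : Int)))) : Int))]),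
         st.2 ++ [PySem.Str.slice text (some char_idx) (some (char_idx + (K : Int)))]))
      ([], [])).1
    = (PySem.Set.ofList ((List.range (text.toList.length + 1 - K)).map (pvWstr text.toList K))).map
        (fun g => (g, (PySem.Str.count text g : Int))) := by
  rw [pvAfold (fun i => PySem.Str.slice text (some i) (some (i + (K : Int))))
      (fun g => (PySem.Str.count text g : Int)), pvDedup_eq]
  rw [PySem.Str.len, pvRange, List.map_map]
  have hw : (fun i => PySem.Str.slice text (some i) (some (i + (K : Int)))) ∘ (fun (i : Nat) => (i : Int))
      = pvWstr text.toList K := by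
    funext i
    exact pvSlice text K i
  rw [hw]
  simp

-- B's pipeline: distinct windows paired with the greedy sweep over their start positions
theorem pvB (text : String) (K : Nat) :
    (((PySem.List.pyRange 0 (PySem.Str.len text - (K : Int) + 1) 1).foldl
        (fun (d : PySem.Dict String (List Int)) i =>
          d.modify (PySem.Str.slice text (some i) (some (i + (K : Int)))) [] (· ++ [i]))
        PySem.Dict.empty).items.map (fun gp =>
          (gp.1, (gp.2.foldl (fun (st : Int × Int) p => if st.2 ≤ p then (st.1 + 1, p + (K : Int)) else st)
            ((0 : Int), (0 : Int))).1)))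
    = (PySem.Set.ofList ((List.range (text.toList.length + 1 - K)).map (pvWstr text.toList K))).map
        (fun g => (g, (((List.range (text.toList.length + 1 - K)).filter
            (fun i => pvWstr text.toList K i == g)).foldl (pvStep K) ((0 : Int), (0 : Nat))).1)) := by
  rw [PySem.Str.len, pvRange]
  set idxs : List Int := ((List.range (text.toList.length + 1 - K)).map (fun (i : Nat) => (i : Int))) with hidxs
  set key : Int → String := fun i => PySem.Str.slice text (some i) (some (i + (K : Int))) with hkey
  have hw : key ∘ (fun (i : Nat) => (i : Int)) = pvWstr text.toList K := by
    funext i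
    exact pvSlice text K i
  set d := idxs.foldl (fun (d : PySem.Dict String (List Int)) i => d.modify (key i) [] (· ++ [i])) PySem.Dict.empty with hd
  have hnodup : d.keys.Nodup := by
    rw [hd]
    exact PySem.Dict.nodup_keys_foldl_modify_key idxs key [] (fun _ i => (· ++ [i])) _ PySem.Dict.nodup_keys_empty
  have hkeys : d.keys
      = PySem.Set.ofList ((List.range (text.toList.length + 1 - K)).map (pvWstr text.toList K)) := by
    rw [hd, PySem.Dict.keys_foldl_modify_key idxs key [] (fun _ i => (· ++ [i])), PySem.Dict.keys_empty,
      PySem.Set.update_nil_left, hidxs, List.map_map, hw]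
  have hgetD : ∀ gq, d.getD gq []
      = ((List.range (text.toList.length + 1 - K)).filter
          (fun i => pvWstr text.toList K i == gq)).map (fun (i : Nat) => (i : Int)) := by
    intro gq
    have hfold : d = (idxs.map (fun i => (key i, i))).foldl
        (fun (d : PySem.Dict String (List Int)) p => d.modify p.1 [] (· ++ [p.2])) PySem.Dict.empty := by
      rw [hd]
      exact (List.foldl_map (f := fun i => (key i, i))
        (g := fun (d : PySem.Dict String (List Int)) p => d.modify p.1 [] (· ++ [p.2]))).symm
    rw [hfold, PySem.Dict.getD_foldl_modify_append, PySem.Dict.getD_empty, List.nil_append]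
    rw [List.filter_map, List.map_map]
    have h1 : ((fun (x : String × Int) => x.2) ∘ fun i => (key i, i)) = (fun (i : Int) => i) := rfl
    have h2 : ((fun (p : String × Int) => p.1 == gq) ∘ fun i => (key i, i)) = (fun i => key i == gq) := rfl
    rw [h1, h2, List.map_id_fun']
    rw [hidxs, List.filter_map]
    simp only [id_eq]
    congr 1
    apply List.filter_congr
    intro i _
    have hwi := congrFun hw i
    simp only [Function.comp] at hwi
    simp only [Function.comp, hwi]
  rw [PySem.Dict.items_eq_map_keys d hnodup [], hkeys, List.map_map]
  apply List.map_congr_left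
  intro g _
  have : ((fun gp => (gp.1, (List.foldl (fun (st : Int × Int) p => if st.2 ≤ p then (st.1 + 1, p + (K : Int)) else st) ((0 : Int), (0 : Int)) gp.2).1)) ∘ fun k => (k, d.getD k []))
      = fun k => (k, (List.foldl (fun (st : Int × Int) p => if st.2 ≤ p then (st.1 + 1, p + (K : Int)) else st) ((0 : Int), (0 : Int)) (d.getD k [])).1) := rfl
  rw [this]
  simp only [hgetD g]
  have hz : ((0 : Int), (0 : Int)) = ((0 : Int), ((0 : Nat) : Int)) := by norm_num
  rw [hz, pvGreedyCast K _ 0 0]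

-- ===== VERDICT (by name: the statement is the Claim_ definition above) =====
theorem convert_to_data_format_spec : Claim_equal_convert_to_data_format := by
  intro s k _ hPre
  unfold Pre_convert_to_data_format at hPre
  unfold Spec_convert_to_data_format convert_to_data_format convert_to_data_format_alt
  obtain ⟨K, rfl⟩ : ∃ K : Nat, k = (K : Int) := ⟨k.toNat, (Int.toNat_of_nonneg hPre).symm⟩
  simp only []
  rw [pvA, pvB]
  apply List.map_congr_left
  intro g hg
  have hgW := (PySem.Set.mem_ofList _ _).mp hg
  rw [PySem.Str.count_eq]
  exact congrArg (fun v => (g, v)) (pvPG _ K g hgW).symm
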